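-- pv_equiv track=rewrite | github.com/shuoli90/Rank-Calibration | utils/text_processing.py | clean_generation
-- ===== SOURCE A (Python) =====
-- def clean_generation(generation):
--     strings_to_filter_on = [
--                 '.', '\n', 'Q:', 'A:', 'question:', 'answer:', 'Question:', 'Answer:', 'Questions:', 'questions:', 'QUESTION:',
--                 'ANSWER:'
--             ]
--     for string in strings_to_filter_on:
--         if string in generation:
--             generation = generation.split(string)[0]
--     return generation.strip()
-- ===== SOURCE B (Python) =====
-- def clean_generation(generation):
--     strings_to_filter_on = [
--                 '.', '\n', 'Q:', 'A:', 'question:', 'answer:', 'Question:', 'Answer:', 'Questions:', 'questions:', 'QUESTION:',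
--                 'ANSWER:'
--             ]
--     cut = len(generation)
--     for s in strings_to_filter_on:
--         i = generation.find(s)
--         if i != -1 and i < cut:
--             cut = i
--     return generation[:cut].strip()
-- ===== Notes on version B (the rewrite author's own statement) =====
-- stated objective: alternative
-- what changed: Instead of repeatedly splitting and reassigning the string for each filter token, B keeps the original string intact and maintains a single earliest-cut-index accumulator (min over first-occurrence indices), slicing once at the end; equality holds because no token's first character can occur inside another token's tail, so sequential suffix-truncation converges to the global minimum first occurrence.
import Mathlib
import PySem

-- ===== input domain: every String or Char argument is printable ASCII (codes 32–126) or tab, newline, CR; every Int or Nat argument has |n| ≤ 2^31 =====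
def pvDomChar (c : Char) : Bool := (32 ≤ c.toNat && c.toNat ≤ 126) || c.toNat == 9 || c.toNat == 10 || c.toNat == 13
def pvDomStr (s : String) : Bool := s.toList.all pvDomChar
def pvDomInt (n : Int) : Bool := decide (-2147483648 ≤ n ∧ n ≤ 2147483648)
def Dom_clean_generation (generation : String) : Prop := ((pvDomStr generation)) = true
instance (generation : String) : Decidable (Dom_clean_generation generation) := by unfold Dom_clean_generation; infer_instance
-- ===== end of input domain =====

-- B replaces A's repeated split-and-reassign loop by a single earliest-cut-index accumulator over the same
-- token list, slicing the original string once at the end (objective: alternative decomposition, same cost).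

-- ===== PORT A =====
def pvTokensA : List String := [".", "\n", "Q:", "A:", "question:", "answer:", "Question:", "Answer:", "Questions:", "questions:", "QUESTION:", "ANSWER:"]

-- generation = generation.split(string)[0] when string in generation ([0] of a split by a found
-- separator is always defined, so headI's default is never used)
def pvStepA (g : String) (tok : String) : String :=
  if PySem.Str.isIn tok g then ((PySem.Str.split? g tok).getD []).headI else g

def clean_generation (generation : String) : String :=
  PySem.Str.strip (pvTokensA.foldl pvStepA generation)

-- ===== PORT B =====
def pvTokensB : List String := [".", "\n", "Q:", "A:", "question:", "answer:", "Question:", "Answer:", "Questions:", "questions:", "QUESTION:", "ANSWER:"]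

def pvStepB (generation : String) (cut : Int) (s : String) : Int :=
  let i := PySem.Str.find generation s
  if i ≠ -1 ∧ i < cut then i else cut

def clean_generation_alt (generation : String) : String :=
  let cut := pvTokensB.foldl (pvStepB generation) (PySem.Str.len generation)
  PySem.Str.strip (PySem.Str.slice generation none (some cut))

-- ===== PRECONDITION & SPEC =====
def Spec_clean_generation (generation : String) (out : String) : Prop := out = clean_generation_alt generation
instance (generation : String) (out : String) : Decidable (Spec_clean_generation generation out) := by unfold Spec_clean_generation; infer_instance

-- ===== CLAIM (what is proved, stated in full; the proofs are below) =====
def Claim_equal_clean_generation : Prop := ∀ (generation : String), Dom_clean_generation generation → Spec_clean_generation generation (clean_generation generation)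

-- ===== LEMMAS AND PROOFS =====

-- first characters of the filter tokens (no token contains any of these past position 0)
def pvFC : List Char := ['.', '\n', 'Q', 'A', 'q', 'a']

-- char-level version of A's step
def pvStepAC (g t : List Char) : List Char :=
  if PySem.Chars.isIn t g then (PySem.Chars.splitOn g t).headI else g

-- char-level version of B's step (cut as a Nat)
def pvCutC (l : List Char) (c : Nat) (t : List Char) : Nat :=
  if PySem.Chars.find l t ≠ -1 ∧ PySem.Chars.find l t < (c : Int) then (PySem.Chars.find l t).toNat else c

-- invariant: the current cut is the string's end or sits on a first-character of some token
def pvInv (l : List Char) (c : Nat) : Prop :=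
  c = l.length ∨ ∃ ch, l[c]? = some ch ∧ ch ∈ pvFC

lemma pv_find_go_shift (sub : List Char) : ∀ (l : List Char) (k : Nat),
    PySem.Chars.find.go sub l k =
      if PySem.Chars.find l sub = -1 then -1 else PySem.Chars.find l sub + k := by
  intro l
  induction l with
  | nil =>
    intro k
    simp only [PySem.Chars.find, PySem.Chars.find.go.eq_1]
    by_cases h : sub.isEmpty <;> simp [h]
  | cons c rest ih =>
    intro k
    simp only [PySem.Chars.find, PySem.Chars.find.go.eq_2]
    by_cases h : sub.isPrefixOf (c :: rest)
    · simp [h]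
    · simp only [h, Bool.false_eq_true, if_false]
      rw [ih, ih (0 + 1)]
      have hge := PySem.Chars.neg_one_le_find rest sub
      by_cases h2 : PySem.Chars.find rest sub = -1 <;> simp [h2] <;> push_cast <;> omega

lemma pv_find_cons (sub : List Char) (c : Char) (rest : List Char) :
    PySem.Chars.find (c :: rest) sub =
      if sub.isPrefixOf (c :: rest) then 0
      else if PySem.Chars.find rest sub = -1 then -1 else PySem.Chars.find rest sub + 1 := by
  have h0 : PySem.Chars.find (c :: rest) sub = PySem.Chars.find.go sub (c :: rest) 0 := rfl
  rw [h0, PySem.Chars.find.go.eq_2]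
  by_cases h : sub.isPrefixOf (c :: rest)
  · simp [h]
  · simp only [h, Bool.false_eq_true, if_false]
    rw [pv_find_go_shift]
    have hge := PySem.Chars.neg_one_le_find rest sub
    by_cases h2 : PySem.Chars.find rest sub = -1 <;> simp [h2] <;> push_cast <;> omega

lemma pv_find_prefix_zero {sub l : List Char} (h : sub <+: l) : PySem.Chars.find l sub = 0 := by
  cases l with
  | nil =>
    have : sub = [] := List.prefix_nil.mp h
    simp [this, PySem.Chars.find, PySem.Chars.find.go.eq_1, List.isEmpty]
  | cons c rest =>
    rw [pv_find_cons]
    simp [List.isPrefixOf_iff_prefix.mpr h]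

lemma pv_go_acc (sep : List Char) : ∀ (fuel : Nat) (l cur : List Char) (acc : List (List Char)),
    PySem.Chars.splitOn.go sep fuel l cur acc =
      acc.reverse ++ PySem.Chars.splitOn.go sep fuel l cur [] := by
  intro fuel
  induction fuel with
  | zero =>
    intro l cur acc
    rw [PySem.Chars.splitOn.go.eq_def, PySem.Chars.splitOn.go.eq_def]
    cases l <;> simp
  | succ fuel ih =>
    intro l cur acc
    cases l with
    | nil =>
      rw [PySem.Chars.splitOn.go.eq_def, PySem.Chars.splitOn.go.eq_def]
      simp
    | cons c rest =>
      rw [PySem.Chars.splitOn.go.eq_def]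
      conv_rhs => rw [PySem.Chars.splitOn.go.eq_def]
      by_cases h : sep.isPrefixOf (c :: rest)
      · simp only [h, if_true]
        rw [ih _ _ (cur.reverse :: acc), ih _ _ [cur.reverse]]
        simp
      · simp only [h, Bool.false_eq_true, if_false]
        rw [ih]

lemma pv_go_head (sep : List Char) (hsep : sep ≠ []) :
    ∀ (fuel : Nat) (l cur : List Char), l.length < fuel →
      PySem.Chars.isIn sep l = true →
      ∃ rest, PySem.Chars.splitOn.go sep fuel l cur [] =
        (cur.reverse ++ l.take (PySem.Chars.find l sep).toNat) :: rest := by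
  intro fuel
  induction fuel with
  | zero => intro l cur h; omega
  | succ fuel ih =>
    intro l cur hfuel hin
    cases l with
    | nil =>
      exfalso
      have : PySem.Chars.find [] sep = -1 := by
        simp [PySem.Chars.find, PySem.Chars.find.go.eq_1, List.isEmpty_iff, hsep]
      simp [PySem.Chars.isIn, this] at hin
    | cons c rest =>
      rw [PySem.Chars.splitOn.go.eq_def]
      by_cases h : sep.isPrefixOf (c :: rest)
      · simp only [h, if_true]
        rw [pv_go_acc]
        refine ⟨PySem.Chars.splitOn.go sep fuel (List.drop sep.length (c :: rest)) [] [], ?_⟩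
        have hf : PySem.Chars.find (c :: rest) sep = 0 :=
          pv_find_prefix_zero (List.isPrefixOf_iff_prefix.mp h)
        simp [hf]
      · simp only [h, Bool.false_eq_true, if_false]
        have hin' : PySem.Chars.isIn sep rest = true := by
          have hinf : sep <:+: (c :: rest) := (PySem.Chars.isIn_iff_infix _ _).mp hin
          rcases List.infix_cons_iff.mp hinf with hpre | hinf'
          · exact absurd (List.isPrefixOf_iff_prefix.mpr hpre) h
          · exact (PySem.Chars.isIn_iff_infix _ _).mpr hinf'
        have hfind : PySem.Chars.find rest sep ≠ -1 :=
          (PySem.Chars.find_ne_neg_one_iff _ _).mpr ((PySem.Chars.isIn_iff_infix _ _).mp hin')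
        obtain ⟨r, hr⟩ := ih rest (c :: cur) (by simpa using Nat.lt_of_succ_lt_succ hfuel) hin'
        refine ⟨r, ?_⟩
        rw [hr]
        have hge : 0 ≤ PySem.Chars.find rest sep := by
          have := PySem.Chars.neg_one_le_find rest sep; omega
        have hfc : PySem.Chars.find (c :: rest) sep = PySem.Chars.find rest sep + 1 := by
          rw [pv_find_cons]; simp [h, hfind]
        rw [hfc]
        have : (PySem.Chars.find rest sep + 1).toNat = (PySem.Chars.find rest sep).toNat + 1 := by
          omega
        simp [this]

lemma pv_splitOn_head {l sep : List Char} (hsep : sep ≠ []) (hin : PySem.Chars.isIn sep l = true) :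
    ∃ rest, PySem.Chars.splitOn l sep = l.take (PySem.Chars.find l sep).toNat :: rest := by
  rw [PySem.Chars.splitOn.eq_1]
  simpa using pv_go_head sep hsep (l.length + 1) l [] (by omega) hin

-- occurrences inside a take are exactly the occurrences that fit before the cut
lemma pv_occ_take {t l : List Char} (ht : t ≠ []) (i c : Nat) :
    t <+: (l.take c).drop i ↔ (t <+: l.drop i ∧ i + t.length ≤ c) := by
  rw [List.drop_take, List.prefix_take_iff]
  have : 0 < t.length := List.length_pos_iff.mpr ht
  constructor
  · rintro ⟨h1, h2⟩; exact ⟨h1, by omega⟩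
  · rintro ⟨h1, h2⟩; exact ⟨h1, by omega⟩

lemma pv_find_uniq {t s : List Char} (j : Nat) (hj : t <+: s.drop j)
    (hmin : ∀ i < j, ¬ t <+: s.drop i) : PySem.Chars.find s t = (j : Int) := by
  have hinf : t <:+: s := hj.isInfix.trans (s.drop_suffix j).isInfix
  have hge : 0 ≤ PySem.Chars.find s t := (PySem.Chars.find_nonneg_iff _ _).mpr hinf
  obtain ⟨h1, h2⟩ := PySem.Chars.find_spec hge
  have : (PySem.Chars.find s t).toNat = j := by
    rcases Nat.lt_trichotomy (PySem.Chars.find s t).toNat j with h | h | h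
    · exact absurd h1 (hmin _ h)
    · exact h
    · exact absurd hj (h2 _ h)
  omega

lemma pv_prefix_getElem? {t u : List Char} (h : t <+: u) (k : Nat) (hk : k < t.length) :
    u[k]? = t[k]? := by
  obtain ⟨r, rfl⟩ := h
  exact List.getElem?_append_left hk

-- the main step: A's split-truncation of the current prefix equals B's min-cut update
lemma pv_step (l t : List Char) (c : Nat) (hc : c ≤ l.length) (ht : t ≠ [])
    (hhead : ∀ ch ∈ t.take 1, ch ∈ pvFC)
    (htail : ∀ ch ∈ t.drop 1, ch ∉ pvFC)
    (hinv : pvInv l c) :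
    pvStepAC (l.take c) t = l.take (pvCutC l c t) ∧ pvCutC l c t ≤ c ∧ pvInv l (pvCutC l c t) := by
  have htlen : 0 < t.length := List.length_pos_iff.mpr ht
  by_cases hneg : PySem.Chars.find l t = -1
  · -- token nowhere in l: both sides unchanged
    have hnin : ¬ t <:+: l := (PySem.Chars.find_eq_neg_one_iff _ _).mp hneg
    have hnin' : PySem.Chars.isIn t (l.take c) = false := by
      rw [PySem.Chars.isIn_eq_false_iff]
      intro hinf
      exact hnin (hinf.trans (l.take_prefix c).isInfix)
    have hcut : pvCutC l c t = c := by simp [pvCutC, hneg]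
    refine ⟨?_, by omega, by rw [hcut]; exact hinv⟩
    simp [pvStepAC, hnin', hcut]
  · have hge : 0 ≤ PySem.Chars.find l t := by
      have := PySem.Chars.neg_one_le_find l t; omega
    set j := (PySem.Chars.find l t).toNat with hjdef
    obtain ⟨hocc, hmin⟩ := PySem.Chars.find_spec hge
    by_cases hjc : j < c
    · -- first occurrence lies before the cut: both sides truncate at j
      have hfit : j + t.length ≤ c := by
        by_contra hbad
        rw [Nat.not_le] at hbad
        have hlen : j + t.length ≤ l.length := by
          have := hocc.length_le
          simp at this; omega
        have hcne : c ≠ l.length := by omega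
        rcases hinv with h | ⟨ch, hch, hfc⟩
        · exact hcne h
        · -- l[c] is a tail character of t, contradicting htail
          have h1 : l[c]? = (l.drop j)[c - j]? := by
            rw [List.getElem?_drop]; congr 1; omega
          have h2 : (l.drop j)[c - j]? = t[c - j]? := by
            exact pv_prefix_getElem? hocc (c - j) (by omega)
          have h3 : t[c - j]? = some ch := by rw [← h2, ← h1, hch]
          have hmem : ch ∈ t.drop 1 := by
            have : (t.drop 1)[c - j - 1]? = some ch := by
              rw [List.getElem?_drop]
              rw [← h3]; congr 1; omega
            exact List.mem_of_getElem? this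
          exact htail ch hmem hfc
      have hocc' : t <+: (l.take c).drop j := (pv_occ_take ht j c).mpr ⟨hocc, hfit⟩
      have hin' : PySem.Chars.isIn t (l.take c) = true := by
        rw [← PySem.Chars.exists_prefix_drop_iff_isIn]; exact ⟨j, hocc'⟩
      have hfind' : PySem.Chars.find (l.take c) t = (j : Int) := by
        refine pv_find_uniq j hocc' ?_
        intro i hi hbad
        exact hmin i hi ((pv_occ_take ht i c).mp hbad).1
      have hcut : pvCutC l c t = j := by
        simp only [pvCutC, hneg, ne_eq, not_false_iff, true_and]
        rw [if_pos]; omega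
      obtain ⟨rest, hsplit⟩ := pv_splitOn_head ht hin'
      refine ⟨?_, by omega, ?_⟩
      · rw [hcut]
        simp [pvStepAC, hin', hsplit, hfind', List.take_take, Nat.min_eq_left (le_of_lt hjc)]
      · rw [hcut]
        right
        cases t with
        | nil => exact absurd rfl ht
        | cons a tl =>
          refine ⟨a, ?_, hhead a (by simp)⟩
          have h1 : l[j]? = (l.drop j)[0]? := by simp [List.getElem?_drop]
          rw [h1, pv_prefix_getElem? hocc 0 htlen]
          rfl
    · -- first occurrence at or after the cut: token absent from the prefix, both keep c
      have hnin' : PySem.Chars.isIn t (l.take c) = false := by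
        rw [PySem.Chars.isIn_eq_false_iff]
        intro hinf
        obtain ⟨i, hi⟩ := (PySem.Chars.exists_prefix_drop_iff_isIn t (l.take c)).mpr
          ((PySem.Chars.isIn_iff_infix _ _).mpr hinf)
        obtain ⟨h1, h2⟩ := (pv_occ_take ht i c).mp hi
        exact hmin i (by omega) h1
      have hcut : pvCutC l c t = c := by
        simp only [pvCutC, hneg, ne_eq, not_false_iff, true_and]
        rw [if_neg]; omega
      refine ⟨?_, by omega, by rw [hcut]; exact hinv⟩
      simp [pvStepAC, hnin', hcut]

lemma pv_fold (l : List Char) (ts : List (List Char))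
    (hts : ∀ t ∈ ts, t ≠ [] ∧ (∀ ch ∈ t.take 1, ch ∈ pvFC) ∧ (∀ ch ∈ t.drop 1, ch ∉ pvFC)) :
    ∀ (c : Nat), c ≤ l.length → pvInv l c →
      ts.foldl pvStepAC (l.take c) = l.take (ts.foldl (pvCutC l) c) ∧
      ts.foldl (pvCutC l) c ≤ l.length ∧ pvInv l (ts.foldl (pvCutC l) c) := by
  induction ts with
  | nil => intro c hc hinv; exact ⟨rfl, hc, hinv⟩
  | cons t ts ih =>
    intro c hc hinv
    obtain ⟨h1, h2, h3⟩ := hts t List.mem_cons_self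
    obtain ⟨ha, hb, hi⟩ := pv_step l t c hc h1 h2 h3 hinv
    have := ih (fun u hu => hts u (List.mem_cons_of_mem _ hu)) (pvCutC l c t) (by omega) hi
    simp only [List.foldl_cons, ha]
    exact this

lemma pv_splitOn_nil_head (m : List Char) : (PySem.Chars.splitOn m []).headI = [] := by
  rw [PySem.Chars.splitOn.eq_1]
  cases m with
  | nil =>
    rw [PySem.Chars.splitOn.go.eq_def]
    simp
  | cons c rest =>
    rw [PySem.Chars.splitOn.go.eq_def]
    have hp : List.isPrefixOf ([] : List Char) (c :: rest) = true :=
      List.isPrefixOf_iff_prefix.mpr (List.nil_prefix)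
    simp only [hp, if_true]
    rw [pv_go_acc]
    simp

-- bridge the String-level folds of the two ports to the char-level functions
lemma pv_foldA_bridge (ts : List String) : ∀ (m : List Char),
    ts.foldl pvStepA (String.ofList m) = String.ofList ((ts.map String.toList).foldl pvStepAC m) := by
  induction ts with
  | nil => intro m; rfl
  | cons t ts ih =>
    intro m
    have hstep : pvStepA (String.ofList m) t = String.ofList (pvStepAC m t.toList) := by
      simp only [pvStepA, pvStepAC, PySem.Str.isIn, String.toList_ofList]
      by_cases h : PySem.Chars.isIn t.toList m
      · simp only [h, if_true, PySem.Str.split?, String.toList_ofList, PySem.Chars.split?]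
        by_cases he : t.toList.isEmpty
        · have hnil : t.toList = [] := List.isEmpty_iff.mp he
          rw [hnil]
          simp only [List.isEmpty_nil, if_true, Option.getD_none, Option.map_none,
            pv_splitOn_nil_head]
          rfl
        · rw [if_neg he]
          obtain ⟨rest, hs⟩ := pv_splitOn_head (by simpa [List.isEmpty_iff] using he) h
          rw [hs]
          simp [List.headI]
      · simp [h]
    rw [List.foldl_cons, hstep, ih, List.map_cons, List.foldl_cons]

lemma pv_foldB_bridge (g : String) (ts : List String) : ∀ (c : Nat), c ≤ g.toList.length →
    ts.foldl (pvStepB g) (c : Int) = (((ts.map String.toList).foldl (pvCutC g.toList) c : ℕ) : ℤ) := by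
  induction ts with
  | nil => intro c _; rfl
  | cons t ts ih =>
    intro c hc
    have hstep : pvStepB g (c : Int) t = (pvCutC g.toList c t.toList : Int) := by
      simp only [pvStepB, pvCutC, PySem.Str.find]
      by_cases h1 : PySem.Chars.find g.toList t.toList ≠ -1 ∧ PySem.Chars.find g.toList t.toList < (c : Int)
      · have hge : 0 ≤ PySem.Chars.find g.toList t.toList := by
          have := PySem.Chars.neg_one_le_find g.toList t.toList
          rcases h1 with ⟨h1a, _⟩
          omega
        rw [if_pos h1, if_pos h1]
        omega
      · rw [if_neg h1, if_neg h1]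
    rw [List.foldl_cons, hstep, List.map_cons, List.foldl_cons]
    have hle : pvCutC g.toList c t.toList ≤ c := by
      simp only [pvCutC]
      split_ifs with h
      · omega
      · exact le_refl c
    exact ih _ (by omega)

-- the char-token facts needed for every filter token
lemma pv_tokens_facts : ∀ t ∈ pvTokensA.map String.toList,
    t ≠ [] ∧ (∀ ch ∈ t.take 1, ch ∈ pvFC) ∧ (∀ ch ∈ t.drop 1, ch ∉ pvFC) := by
  have hb : (pvTokensA.map String.toList).all
      (fun t => !t.isEmpty && (t.take 1).all (fun ch => pvFC.contains ch) &&
        (t.drop 1).all (fun ch => !pvFC.contains ch)) = true := by decide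
  intro t ht
  have h := List.all_eq_true.mp hb t ht
  simp only [Bool.and_eq_true, List.all_eq_true, Bool.not_eq_true', List.contains_eq_mem] at h
  obtain ⟨⟨h1, h2⟩, h3⟩ := h
  refine ⟨by simpa [List.isEmpty_iff] using h1, ?_, ?_⟩
  · intro ch hch
    simpa using h2 ch hch
  · intro ch hch
    simpa using h3 ch hch

-- ===== VERDICT (by name: the statement is the Claim_ definition above) =====
theorem clean_generation_spec : Claim_equal_clean_generation := by
  intro g _
  simp only [Spec_clean_generation, clean_generation, clean_generation_alt]
  obtain ⟨hA, hB, _⟩ := pv_fold g.toList (pvTokensA.map String.toList) pv_tokens_facts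
    g.toList.length (le_refl _) (Or.inl rfl)
  rw [List.take_length] at hA
  set cut := (pvTokensA.map String.toList).foldl (pvCutC g.toList) g.toList.length with hcut
  have hA' : pvTokensA.foldl pvStepA g = String.ofList (g.toList.take cut) := by
    conv_lhs => rw [← String.ofList_toList (s := g)]
    rw [pv_foldA_bridge, hA]
  have hTB : pvTokensB = pvTokensA := rfl
  have hB' : pvTokensB.foldl (pvStepB g) (PySem.Str.len g) = ((cut : ℕ) : ℤ) := by
    have hlen : PySem.Str.len g = ((g.toList.length : ℕ) : ℤ) := rfl
    rw [hTB, hlen, pv_foldB_bridge g pvTokensA g.toList.length (le_refl _)]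
  rw [hA', hB']
  apply String.toList_inj.mp
  rw [PySem.Str.toList_strip, PySem.Str.toList_strip, PySem.Str.toList_slice,
    String.toList_ofList]
  have hs : PySem.Chars.slice g.toList none (some ((cut : ℕ) : ℤ)) = g.toList.take cut := by
    show PySem.List.slice g.toList none (some ((cut : ℕ) : ℤ)) = g.toList.take cut
    rw [PySem.List.slice_to g.toList (Int.natCast_nonneg cut)]
    simp
  rw [hs]
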